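-- pv_equiv track=rewrite | github.com/neilneil2000/advent-of-code-2023 | Day14/day14.py | repeat_period
-- ===== SOURCE A (Python) =====
-- from typing import List
--
-- def repeat_period(results: List[int]) -> int:
--     """
--     Returns period of repeat if there is a repeating pattern of results
--     Note: returns 0 if no repeat period found
--     """
--     min_matches = 5
--     max_chunk_size = len(results) // min_matches
--     if max_chunk_size < 1:
--         return 0
--     for chunk_size in range(1, max_chunk_size + 1):
--         chunks = [
--             results[i : i + chunk_size] for i in range(0, len(results), chunk_size)
--         ]
--         if chunks[-1] == chunks[-2] == chunks[-3] == chunks[-4] == chunks[-5]: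
--             return chunk_size
--
--     return 0
-- ===== SOURCE B (Python) =====
-- from typing import List
--
--
-- def repeat_period(results: List[int]) -> int:
--     """
--     Returns period of repeat if there is a repeating pattern of results
--     Note: returns 0 if no repeat period found
--     """
--     n = len(results)
--     for d in range(1, n // 5 + 1):
--         # A non-divisor d makes the trailing chunk shorter than the others,
--         # so only divisors of n can qualify; for a divisor, the last 5 blocks
--         # are all equal iff the last 4d elements equal the 4d elements one
--         # block earlier (a single shifted-suffix comparison).
--         if n % d == 0 and results[n - 4 * d:] == results[n - 5 * d:n - d]:
--             return d
--     return 0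
-- ===== Notes on version B (the rewrite author's own statement) =====
-- stated objective: faster
-- what changed: Instead of materialising all chunks for every candidate size and comparing the last five lists, B tests only divisors of len(results) (a non-divisor leaves a short trailing chunk that can never match) and verifies the five equal blocks with a single shifted-suffix slice comparison.
import Mathlib
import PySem

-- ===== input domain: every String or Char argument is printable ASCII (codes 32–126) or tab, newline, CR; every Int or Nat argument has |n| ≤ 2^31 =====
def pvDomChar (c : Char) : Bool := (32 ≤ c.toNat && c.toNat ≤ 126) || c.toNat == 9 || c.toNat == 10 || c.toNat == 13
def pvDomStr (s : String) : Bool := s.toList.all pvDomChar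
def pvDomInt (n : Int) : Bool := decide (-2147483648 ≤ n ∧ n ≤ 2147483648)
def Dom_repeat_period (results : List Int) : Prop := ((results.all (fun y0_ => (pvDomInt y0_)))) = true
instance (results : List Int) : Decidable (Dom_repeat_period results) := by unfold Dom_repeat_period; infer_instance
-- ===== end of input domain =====

-- B is faster: it tests only divisors of the length and compares one shifted suffix
-- instead of building all chunks for every candidate size (measured much faster on large inputs).


-- ===== PORT A =====
-- chunks[-1] == chunks[-2] == … == chunks[-5]; inside the loop there are always ≥ 5 chunks,
-- so the negative indices never raise and Option equality is exact.
def pvCondA (results : List Int) (d : Int) : Bool :=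
  let chunks : List (List Int) :=
    (PySem.List.pyRange 0 (results.length : Int) d).map
      (fun i => PySem.List.slice results (some i) (some (i + d)))
  (PySem.List.pyGet? chunks (-1) == PySem.List.pyGet? chunks (-2)) &&
  (PySem.List.pyGet? chunks (-2) == PySem.List.pyGet? chunks (-3)) &&
  (PySem.List.pyGet? chunks (-3) == PySem.List.pyGet? chunks (-4)) &&
  (PySem.List.pyGet? chunks (-4) == PySem.List.pyGet? chunks (-5))

def pvLoopA (results : List Int) : List Int → Int
  | [] => 0
  | d :: rest => if pvCondA results d then d else pvLoopA results rest

def repeat_period (results : List Int) : Int :=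
  let max_chunk_size := PySem.Int.floordiv (results.length : Int) 5
  if max_chunk_size < 1 then 0
  else pvLoopA results (PySem.List.pyRange 1 (max_chunk_size + 1) 1)

-- ===== PORT B =====
def pvCondB (results : List Int) (d : Int) : Bool :=
  PySem.Int.mod (results.length : Int) d == 0 &&
  (PySem.List.slice results (some ((results.length : Int) - 4 * d)) none ==
    PySem.List.slice results (some ((results.length : Int) - 5 * d))
      (some ((results.length : Int) - d)))

def pvLoopB (results : List Int) : List Int → Int
  | [] => 0
  | d :: rest => if pvCondB results d then d else pvLoopB results rest

def repeat_period_alt (results : List Int) : Int :=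
  pvLoopB results
    (PySem.List.pyRange 1 (PySem.Int.floordiv (results.length : Int) 5 + 1) 1)

-- ===== PRECONDITION & SPEC =====
def Spec_repeat_period (results : List Int) (out : Int) : Prop := out = repeat_period_alt results
instance (results : List Int) (out : Int) : Decidable (Spec_repeat_period results out) := by unfold Spec_repeat_period; infer_instance

-- ===== CLAIM (what is proved, stated in full; the proofs are below) =====
def Claim_equal_repeat_period : Prop := ∀ (results : List Int), Dom_repeat_period results → Spec_repeat_period results (repeat_period results)

-- ===== LEMMAS AND PROOFS =====

theorem pv_take_drop_split {α : Type} (xs : List α) (a e k : Nat) :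
    (xs.drop a).take (e + k) = (xs.drop a).take e ++ (xs.drop (a + e)).take k := by
  rw [List.take_add, List.drop_drop]

theorem pv_four_blocks {α : Type} (xs : List α) (a e : Nat) :
    (xs.drop a).take (e+(e+(e+e))) =
      (xs.drop a).take e ++ ((xs.drop (a+e)).take e ++
        ((xs.drop (a+e+e)).take e ++ (xs.drop (a+e+e+e)).take e)) := by
  rw [pv_take_drop_split xs a e, pv_take_drop_split xs (a+e) e, pv_take_drop_split xs (a+e+e) e]

theorem pv_append_inj4 {α : Type} (a1 a2 a3 a4 b1 b2 b3 b4 : List α)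
    (h1 : a1.length = b1.length) (h2 : a2.length = b2.length) (h3 : a3.length = b3.length) :
    a1 ++ (a2 ++ (a3 ++ a4)) = b1 ++ (b2 ++ (b3 ++ b4)) ↔
      (a1 = b1 ∧ a2 = b2 ∧ a3 = b3 ∧ a4 = b4) := by
  constructor
  · intro h
    obtain ⟨e1, h'⟩ := List.append_inj h h1
    obtain ⟨e2, h''⟩ := List.append_inj h' h2
    obtain ⟨e3, e4⟩ := List.append_inj h'' h3
    exact ⟨e1, e2, e3, e4⟩
  · rintro ⟨rfl, rfl, rfl, rfl⟩; rfl

theorem pv_chunks_eq (results : List Int) (e : Nat) (he : 1 ≤ e) (hn : 1 ≤ results.length) :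
    (PySem.List.pyRange 0 (results.length : Int) (e : Int)).map
        (fun i => PySem.List.slice results (some i) (some (i + (e:Int)))) =
    (List.range ((results.length + e - 1)/e)).map (fun k => (results.drop (e*k)).take e) := by
  rw [PySem.List.pyRange_of_pos 0 (results.length : Int) (by exact_mod_cast he)]
  rw [if_pos (by exact_mod_cast hn)]
  have h1 : ((results.length : Int) - 0 + (e:Int) - 1) = ((results.length + e - 1 : Nat) : Int) := by
    omega
  rw [h1, ← Int.natCast_div, Int.toNat_natCast, List.map_map]
  apply List.map_congr_left
  intro k hk
  simp only [Function.comp]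
  have h2 : (0:Int) + (e:Int) * (k:Int) = ((e*k : Nat) : Int) := by push_cast; ring
  rw [h2]
  exact PySem.List.slice_natCast_add results (e*k) e

theorem pv_blocks_L (xs : List Int) (e n : Nat) (h5 : 5*e ≤ n) (hn : n = xs.length) :
    xs.drop (n - 4*e) =
      (xs.drop (n - 4*e)).take e ++ ((xs.drop (n - 3*e)).take e ++
        ((xs.drop (n - 2*e)).take e ++ (xs.drop (n - 1*e)).take e)) := by
  conv_lhs => rw [← List.take_of_length_le (l := xs.drop (n - 4*e)) (i := e+(e+(e+e)))
    (by simp [← hn]; omega)]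
  rw [pv_four_blocks, show n - 4*e + e + e + e = n - 1*e by omega,
    show n - 4*e + e + e = n - 2*e by omega, show n - 4*e + e = n - 3*e by omega]

theorem pv_blocks_R (xs : List Int) (e n : Nat) (h5 : 5*e ≤ n) :
    (xs.drop (n - 5*e)).take (4*e) =
      (xs.drop (n - 5*e)).take e ++ ((xs.drop (n - 4*e)).take e ++
        ((xs.drop (n - 3*e)).take e ++ (xs.drop (n - 2*e)).take e)) := by
  conv_lhs => rw [show 4*e = e+(e+(e+e)) by omega, pv_four_blocks]
  rw [show n - 5*e + e + e + e = n - 2*e by omega,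
    show n - 5*e + e + e = n - 3*e by omega, show n - 5*e + e = n - 4*e by omega]

theorem pv_cond_eq (results : List Int) (d : Int) (h1 : 1 ≤ d)
    (h5 : 5 * d ≤ (results.length : Int)) : pvCondA results d = pvCondB results d := by
  obtain ⟨e, rfl⟩ : ∃ e : Nat, d = (e:Int) := ⟨d.toNat, (Int.toNat_of_nonneg (by omega)).symm⟩
  have he1 : 1 ≤ e := by exact_mod_cast h1
  have he5 : 5 * e ≤ results.length := by exact_mod_cast h5
  have hmb : results.length ≤ e * ((results.length + e - 1)/e) ∧
      e * ((results.length + e - 1)/e) ≤ results.length + e - 1 := by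
    have h := Nat.div_add_mod (results.length + e - 1) e
    have hr := Nat.mod_lt (results.length + e - 1) (by omega : 0 < e)
    omega
  have hm5 : 5 ≤ (results.length + e - 1)/e := by
    have h5m : e * 5 ≤ e * ((results.length + e - 1)/e) := by
      rw [Nat.mul_comm e 5]; exact le_trans he5 hmb.1
    exact Nat.le_of_mul_le_mul_left h5m (by omega)
  rw [Bool.eq_iff_iff]
  simp only [pvCondA, pvCondB, Bool.and_eq_true, beq_iff_eq]
  rw [pv_chunks_eq results e he1 (by omega)]
  rw [PySem.Int.mod_eq_zero_iff_dvd, Int.natCast_dvd_natCast]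
  set n := results.length with hn
  set m := (n + e - 1)/e with hmdef
  have hlen : ((List.range m).map (fun k => (results.drop (e*k)).take e)).length = m := by simp
  rw [PySem.List.pyGet?_neg_ofNat _ 1 (by omega) (by omega),
      PySem.List.pyGet?_neg_ofNat _ 2 (by omega) (by omega),
      PySem.List.pyGet?_neg_ofNat _ 3 (by omega) (by omega),
      PySem.List.pyGet?_neg_ofNat _ 4 (by omega) (by omega),
      PySem.List.pyGet?_neg_ofNat _ 5 (by omega) (by omega)]
  rw [hlen]
  simp only [List.getElem?_map, List.getElem?_range (show m - 1 < m by omega),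
    List.getElem?_range (show m - 2 < m by omega), List.getElem?_range (show m - 3 < m by omega),
    List.getElem?_range (show m - 4 < m by omega), List.getElem?_range (show m - 5 < m by omega),
    Option.map_some, Option.some_inj]
  by_cases hdvd : e ∣ n
  · -- divisor case: the five blocks are full; compare with the shifted suffix
    have hme : e * m = n := by
      obtain ⟨q, hq⟩ := hdvd
      have hq1 : q ≤ m := Nat.le_of_mul_le_mul_left (by omega) (by omega : 0 < e)
      have hq2 : m < q + 1 := by
        apply Nat.lt_of_mul_lt_mul_left (a := e)
        have hx : e * (q + 1) = e * q + e := by ring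
        omega
      rw [show m = q by omega]
      omega
    have hmul : ∀ j : Nat, e * (m - j) = n - j * e := by
      intro j; rw [Nat.mul_sub, Nat.mul_comm e j]; omega
    have c1 : ((n:Int) - 4*(e:Int)) = ((n - 4*e : Nat) : Int) := by omega
    have c2 : ((n:Int) - 5*(e:Int)) = ((n - 5*e : Nat) : Int) := by omega
    have c3 : ((n:Int) - (e:Int)) = ((n - 5*e : Nat) : Int) + ((4*e : Nat) : Int) := by
      push_cast; omega
    rw [c1, PySem.List.slice_from_natCast, c2, c3, PySem.List.slice_natCast_add]
    rw [pv_blocks_L results e n he5 hn, pv_blocks_R results e n he5]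
    rw [hmul 1, hmul 2, hmul 3, hmul 4, hmul 5]
    have hlen' : ∀ a : Nat, a ≤ n - e → ((results.drop a).take e).length = e := by
      intro a ha; simp [← hn]; omega
    rw [pv_append_inj4 _ _ _ _ _ _ _ _
      (by rw [hlen' _ (by omega), hlen' _ (by omega)])
      (by rw [hlen' _ (by omega), hlen' _ (by omega)])
      (by rw [hlen' _ (by omega), hlen' _ (by omega)])]
    constructor
    · rintro ⟨⟨⟨g1, g2⟩, g3⟩, g4⟩
      exact ⟨hdvd, g4, g3, g2, g1⟩
    · rintro ⟨-, g1, g2, g3, g4⟩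
      exact ⟨⟨⟨g4, g3⟩, g2⟩, g1⟩
  · -- non-divisor case: the trailing chunk is short, so the first comparison fails
    have hlt : n < e * m := by
      rcases Nat.lt_or_ge n (e * m) with h | h
      · exact h
      · exfalso
        have hme : e * m = n := by omega
        exact hdvd (hme ▸ ⟨m, rfl⟩)
    have e1 : e * (m - 1) = e * m - e := by rw [Nat.mul_sub]; omega
    have e2 : e * (m - 2) = e * m - 2*e := by rw [Nat.mul_sub]; omega
    constructor
    · rintro ⟨⟨⟨g1, -⟩, -⟩, -⟩
      exfalso
      have hlg := congrArg List.length g1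
      simp only [List.length_take, List.length_drop, ← hn, e1, e2] at hlg
      omega
    · rintro ⟨g, -⟩
      exact absurd g hdvd

theorem pv_loop_eq (results : List Int) (ds : List Int)
    (h : ∀ d ∈ ds, pvCondA results d = pvCondB results d) :
    pvLoopA results ds = pvLoopB results ds := by
  induction ds with
  | nil => rfl
  | cons d rest ih =>
    simp only [pvLoopA, pvLoopB, h d (List.mem_cons_self)]
    split
    · rfl
    · exact ih (fun x hx => h x (List.mem_cons_of_mem _ hx))

-- ===== VERDICT (by name: the statement is the Claim_ definition above) =====
theorem repeat_period_spec : Claim_equal_repeat_period := by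
  intro results _
  unfold Spec_repeat_period repeat_period repeat_period_alt
  by_cases hlt : PySem.Int.floordiv (results.length : Int) 5 < 1
  · simp only [hlt, if_true]
    rw [PySem.List.pyRange_one_eq_nil (by omega)]
    rfl
  · simp only [hlt, if_false]
    apply pv_loop_eq
    intro d hd
    rw [PySem.List.mem_pyRange_one] at hd
    apply pv_cond_eq _ _ hd.1
    have h2 : d ≤ PySem.Int.floordiv (results.length : Int) 5 := by omega
    have h3 := (PySem.Int.le_floordiv_iff_mul_le (a := (results.length : Int)) (b := 5) (q := d) (by omega)).mp h2
    omega
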